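-- pv_equiv track=rewrite | github.com/J05hr/practice_problems | CC_Qs/BloombergPractice/ParenDepth.py | deepString
-- ===== SOURCE A (Python) =====
-- def deepString(s):
--
--     res = ""
--     maxd = 0
--
--     if len(s) < 2:
--         return res
--
--     stack = []
--     pair = {')': '(', '}': '{', ']': '['}
--
--     depth = 0
--     temp = ""
--     for charIdx in range(len(s)):
--         char = s[charIdx]
--         if char in "({[":
--             temp = ""
--             stack.append((char, charIdx))
--             depth += 1
--             if maxd < depth:
--                 maxd = depth
--         elif char in ")}]":
--             if len(stack) != 0:
--                 if stack[-1][0] == pair[char]: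
--                     stack.pop(-1)
--                     if depth == maxd:
--                         res = temp
--                     depth -= 1
--         else:
--             temp += char
--
--     return res
-- ===== SOURCE B (Python) =====
-- def deepString(s):
--     res = ""
--     maxd = 0
--     stack = []
--     pair = {')': '(', '}': '{', ']': '['}
--     for ch in s:
--         if ch in "({[":
--             stack.append([ch, ""])
--             if len(stack) > maxd:
--                 maxd = len(stack)
--         elif ch in ")}]":
--             if stack and stack[-1][0] == pair[ch]:
--                 opener, buf = stack.pop()
--                 if len(stack) + 1 == maxd:
--                     res = buf
--         else:
--             if stack:
--                 stack[-1][1] += ch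
--     return res
-- ===== Notes on version B (the rewrite author's own statement) =====
-- stated objective: simpler
-- what changed: Replaces the rolling temp buffer, explicit depth counter, index-carrying stack entries and the len(s)<2 guard with a single stack of per-level (opener, buffer) frames: characters accumulate in the top frame's buffer and a matched pop at the running max depth yields the result.
import Mathlib
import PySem

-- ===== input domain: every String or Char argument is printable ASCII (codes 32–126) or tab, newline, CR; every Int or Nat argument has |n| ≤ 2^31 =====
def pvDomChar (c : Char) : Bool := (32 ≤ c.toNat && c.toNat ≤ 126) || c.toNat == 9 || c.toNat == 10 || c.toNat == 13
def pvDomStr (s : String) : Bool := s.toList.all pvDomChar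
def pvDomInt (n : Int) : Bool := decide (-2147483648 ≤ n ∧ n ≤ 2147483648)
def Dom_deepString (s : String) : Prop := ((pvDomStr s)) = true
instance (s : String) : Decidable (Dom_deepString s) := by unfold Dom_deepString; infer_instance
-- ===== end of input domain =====

-- B replaces A's rolling temp buffer, depth counter and index-carrying stack with a stack of
-- per-level (opener, buffer) frames; objective: simpler state, same O(n) pass.

-- ===== PORT A =====
def pairA (c : Char) : Char :=
  if c = ')' then '(' else if c = '}' then '{' else '['

structure SA where
  res : List Char
  maxd : Int
  stack : List (Char × Int)
  depth : Int
  temp : List Char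
deriving Repr, DecidableEq

def stepA (st : SA) (ic : Int × Char) : SA :=
  let c := ic.2
  if ("({[".toList.contains c) then
    { st with temp := [],
              stack := (c, ic.1) :: st.stack,
              depth := st.depth + 1,
              maxd := if st.maxd < st.depth + 1 then st.depth + 1 else st.maxd }
  else if (")}]".toList.contains c) then
    match st.stack with
    | [] => st
    | (top, _) :: rest =>
      if top = pairA c then
        { st with stack := rest,
                  res := if st.depth = st.maxd then st.temp else st.res,
                  depth := st.depth - 1 }
      else st
  else
    { st with temp := st.temp ++ [c] }

def deepString (s : String) : String :=
  if s.toList.length < 2 then "" else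
    String.ofList ((PySem.List.enumerate s.toList 0).foldl stepA ⟨[], 0, [], 0, []⟩).res

-- ===== PORT B =====
structure SB where
  res : List Char
  maxd : Int
  stack : List (Char × List Char)
deriving Repr, DecidableEq

def stepB (st : SB) (c : Char) : SB :=
  if ("({[".toList.contains c) then
    let stack' := (c, ([] : List Char)) :: st.stack
    { st with stack := stack',
              maxd := if (stack'.length : Int) > st.maxd then (stack'.length : Int) else st.maxd }
  else if (")}]".toList.contains c) then
    match st.stack with
    | [] => st
    | (top, buf) :: rest =>
      if top = pairA c then
        { st with stack := rest,
                  res := if (rest.length : Int) + 1 = st.maxd then buf else st.res }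
      else st
  else
    match st.stack with
    | [] => st
    | (top, buf) :: rest => { st with stack := (top, buf ++ [c]) :: rest }

def deepString_alt (s : String) : String :=
  String.ofList (s.toList.foldl stepB ⟨[], 0, []⟩).res

-- ===== PRECONDITION & SPEC =====
def Spec_deepString (s : String) (out : String) : Prop := out = deepString_alt s
instance (s : String) (out : String) : Decidable (Spec_deepString s out) := by unfold Spec_deepString; infer_instance

-- ===== CLAIM (what is proved, stated in full; the proofs are below) =====
def Claim_equal_deepString : Prop := ∀ (s : String), Dom_deepString s → Spec_deepString s (deepString s)

-- ===== LEMMAS AND PROOFS =====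

def InvAB (a : SA) (b : SB) : Prop :=
  b.res = a.res ∧ b.maxd = a.maxd ∧
  b.stack.map Prod.fst = a.stack.map Prod.fst ∧
  a.depth = (a.stack.length : Int) ∧ a.depth ≤ a.maxd ∧
  (a.depth = a.maxd → ∀ top buf rest, b.stack = (top, buf) :: rest → buf = a.temp)

lemma inv_init : InvAB ⟨[], 0, [], 0, []⟩ ⟨[], 0, []⟩ := by
  refine ⟨rfl, rfl, rfl, rfl, le_refl _, ?_⟩
  intro _ top buf rest h
  simp at h

lemma inv_step (a : SA) (b : SB) (i : Int) (c : Char) (h : InvAB a b) :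
    InvAB (stepA a (i, c)) (stepB b c) := by
  obtain ⟨ares, amaxd, astack, adepth, atemp⟩ := a
  obtain ⟨bres, bmaxd, bstack⟩ := b
  obtain ⟨hres, hmaxd, hmap, hdep, hle, hbuf⟩ := h
  simp only at hres hmaxd hmap hdep hle hbuf
  by_cases hopen : ("({[".toList.contains c)
  · -- opener
    simp only [stepA, stepB, hopen, if_pos, InvAB]
    refine ⟨hres, ?_, ?_, ?_, ?_, ?_⟩
    · have hlen : bstack.length = astack.length := by
        have := congrArg List.length hmap; simpa using this
      simp [hmaxd, hlen, hdep]
    · simp [hmap]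
    · simp only [List.length_cons]; push_cast; omega
    · split <;> omega
    · intro _ top buf rest hb
      simp at hb
      exact hb.1.2
  · by_cases hclose : (")}]".toList.contains c)
    · -- closer
      simp only [stepA, stepB, hopen, hclose, if_neg, if_pos, Bool.false_eq_true,
        not_false_eq_true]
      cases astack with
      | nil =>
        cases bstack with
        | nil => exact ⟨hres, hmaxd, hmap, hdep, hle, fun hd top buf rest hbs => by simp at hbs⟩
        | cons p r => simp at hmap
      | cons pa ra =>
        cases bstack with
        | nil => simp at hmap
        | cons pb rb =>
          obtain ⟨topa, ia⟩ := pa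
          obtain ⟨topb, bufb⟩ := pb
          simp only [List.map_cons, List.cons.injEq] at hmap
          obtain ⟨htops, hmaps⟩ := hmap
          have hlens : rb.length = ra.length := by
            have := congrArg List.length hmaps; simpa using this
          simp only [htops]
          by_cases hm : topa = pairA c
          · simp only [if_pos hm, InvAB]
            refine ⟨?_, hmaxd, hmaps, ?_, by simp at hdep ⊢; omega, ?_⟩
            · by_cases hd : adepth = amaxd
              · have hb1 : bufb = atemp := hbuf hd topb bufb rb rfl
                rw [if_pos hd, if_pos (by simp at hdep; omega), hb1]
              · rw [if_neg hd, if_neg (by simp at hdep; omega), hres]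
            · simp at hdep ⊢; omega
            · intro hd top buf rest hbs
              exfalso
              simp at hd hdep
              omega
          · simp only [if_neg hm, InvAB]
            exact ⟨hres, hmaxd, by simp [hmaps], hdep, hle,
              fun hd top buf rest hbs => by
                simp only [List.cons.injEq, Prod.mk.injEq] at hbs
                exact (hbs.1.2.symm.trans (hbuf hd topb bufb rb rfl))⟩
    · -- plain character
      simp only [stepA, stepB, hopen, hclose, if_neg, Bool.false_eq_true, not_false_eq_true]
      cases bstack with
      | nil =>
        refine ⟨hres, hmaxd, by simpa using hmap, hdep, hle, ?_⟩
        intro _ top buf rest hbs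
        simp at hbs
      | cons p r =>
        obtain ⟨top0, buf0⟩ := p
        refine ⟨hres, hmaxd, by simpa using hmap, hdep, hle, ?_⟩
        intro hd top buf rest hbs
        simp only [List.cons.injEq, Prod.mk.injEq] at hbs
        simp only at hd
        have hb0 : buf0 = atemp := hbuf hd top0 buf0 r rfl
        simp only [← hbs.1.2, hb0]

lemma inv_fold (l : List Char) : ∀ (i : Int) (a : SA) (b : SB), InvAB a b →
    InvAB ((PySem.List.enumerate l i).foldl stepA a) (l.foldl stepB b) := by
  induction l with
  | nil => intro i a b h; simpa [PySem.List.enumerate_nil] using h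
  | cons c rest ih =>
    intro i a b h
    rw [PySem.List.enumerate_cons]
    simp only [List.foldl_cons]
    exact ih (i + 1) _ _ (inv_step a b i c h)

lemma alt_short (c : Char) : (stepB ⟨[], 0, []⟩ c).res = [] := by
  unfold stepB
  split_ifs <;> rfl

-- ===== VERDICT (by name: the statement is the Claim_ definition above) =====
theorem deepString_spec : Claim_equal_deepString := by
  intro s _
  unfold Spec_deepString deepString deepString_alt
  by_cases hlen : s.toList.length < 2
  · rw [if_pos hlen]
    match hL : s.toList with
    | [] => rfl
    | [c] => simp [alt_short c]
    | c1 :: c2 :: r => rw [hL] at hlen; simp at hlen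
  · rw [if_neg hlen]
    have h := inv_fold s.toList 0 ⟨[], 0, [], 0, []⟩ ⟨[], 0, []⟩ inv_init
    exact congrArg String.ofList h.1.symm
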